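-- pv_equiv track=rewrite | github.com/ivanillera/TP1Sintaxis | Lexer.py | a_braopen
-- ===== SOURCE A (Python) =====
-- TRAMPA = -1
--
-- RESULTADO_ACEPTADO = "ACEPTADO"
--
-- RESULTADO_TRAMPA = "TRAMPA"
--
-- RESULTADO_NO_ACEPTADO = "NO_ACEPTADO"
--
-- def d_braopen(estado_anterior, caracter):
-- 	if estado_anterior == 0 and caracter == "{":
-- 		return 1
--
--
-- 	return RESULTADO_TRAMPA
--
-- def a_braopen(cadena):
-- 	Finales = [1]
-- 	estado_actual = 0
--
-- 	for caracter in cadena: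
-- 		estado_proximo = d_braopen(estado_actual, caracter)
-- 		if estado_proximo == TRAMPA:
-- 			return RESULTADO_TRAMPA
-- 		estado_actual = estado_proximo
--
-- 	if estado_actual in Finales:
-- 		return RESULTADO_ACEPTADO
-- 	else:
-- 		return RESULTADO_NO_ACEPTADO
-- ===== SOURCE B (Python) =====
-- TRAMPA = -1
-- RESULTADO_ACEPTADO = "ACEPTADO"
-- RESULTADO_TRAMPA = "TRAMPA"
-- RESULTADO_NO_ACEPTADO = "NO_ACEPTADO"
--
-- def a_braopen(cadena):
--     return RESULTADO_ACEPTADO if cadena == "{" else RESULTADO_NO_ACEPTADO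
-- ===== Notes on version B (the rewrite author's own statement) =====
-- stated objective: simpler
-- what changed: Replaces the per-character DFA loop (whose TRAMPA branch is dead code, since the int -1 is compared against the string "TRAMPA") with a single closed-form string equality against the one accepted word.
import Mathlib
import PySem

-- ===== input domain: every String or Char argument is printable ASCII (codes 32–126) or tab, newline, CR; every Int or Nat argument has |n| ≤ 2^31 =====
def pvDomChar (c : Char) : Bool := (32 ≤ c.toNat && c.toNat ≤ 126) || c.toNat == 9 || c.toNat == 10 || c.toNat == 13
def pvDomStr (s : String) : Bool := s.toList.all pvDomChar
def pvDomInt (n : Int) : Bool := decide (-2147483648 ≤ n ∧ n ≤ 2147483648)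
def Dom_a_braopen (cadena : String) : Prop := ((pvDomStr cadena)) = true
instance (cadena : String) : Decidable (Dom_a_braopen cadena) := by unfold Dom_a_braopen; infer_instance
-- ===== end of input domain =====

-- B replaces A's per-character DFA loop (whose TRAMPA return is dead code: the int -1
-- is compared against the string "TRAMPA") with one closed-form string equality.

-- ===== PORT A =====
-- Python's estado may hold the int 0/1 or the string "TRAMPA": modelled as Int ⊕ String.
def d_braopen (estado_anterior : Sum Int String) (caracter : Char) : Sum Int String :=
  if estado_anterior = Sum.inl 0 ∧ caracter = '{' then Sum.inl 1
  else Sum.inr "TRAMPA"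

def a_braopen_loop : List Char → Sum Int String → String
  | [], estado_actual =>
      if estado_actual = Sum.inl 1 then "ACEPTADO" else "NO_ACEPTADO"
  | caracter :: rest, estado_actual =>
      let estado_proximo := d_braopen estado_actual caracter
      -- Python: 'estado_proximo == TRAMPA' compares against the int -1
      if estado_proximo = Sum.inl (-1) then "TRAMPA"
      else a_braopen_loop rest estado_proximo

def a_braopen (cadena : String) : String :=
  a_braopen_loop cadena.toList (Sum.inl 0)

-- ===== PORT B =====
def a_braopen_alt (cadena : String) : String :=
  if cadena = "{" then "ACEPTADO" else "NO_ACEPTADO"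

-- ===== PRECONDITION & SPEC =====
def Spec_a_braopen (cadena : String) (out : String) : Prop := out = a_braopen_alt cadena
instance (cadena : String) (out : String) : Decidable (Spec_a_braopen cadena out) := by unfold Spec_a_braopen; infer_instance

-- ===== CLAIM (what is proved, stated in full; the proofs are below) =====
def Claim_equal_a_braopen : Prop := ∀ (cadena : String), Dom_a_braopen cadena → Spec_a_braopen cadena (a_braopen cadena)

-- ===== LEMMAS AND PROOFS =====

-- from the dead-state "TRAMPA" the loop always ends in NO_ACEPTADO
theorem loop_trampa (l : List Char) (s : String) :
    a_braopen_loop l (Sum.inr s) = "NO_ACEPTADO" := by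
  induction l generalizing s with
  | nil => simp [a_braopen_loop]
  | cons c rest ih => simp [a_braopen_loop, d_braopen, ih]

theorem loop_one (l : List Char) :
    a_braopen_loop l (Sum.inl 1) = if l = [] then "ACEPTADO" else "NO_ACEPTADO" := by
  cases l with
  | nil => simp [a_braopen_loop]
  | cons c rest => simp [a_braopen_loop, d_braopen, loop_trampa]

-- ===== VERDICT (by name: the statement is the Claim_ definition above) =====
theorem a_braopen_spec : Claim_equal_a_braopen := by
  intro cadena _
  unfold Spec_a_braopen a_braopen a_braopen_alt
  have hiff : cadena = "{" ↔ cadena.toList = ['{'] := by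
    constructor
    · intro h; subst h; rfl
    · intro h; exact String.toList_inj.mp (by simp [h])
  cases hl : cadena.toList with
  | nil =>
      have : ¬ cadena = "{" := by
        intro h; rw [hiff] at h; simp [hl] at h
      simp [a_braopen_loop, this]
  | cons c rest =>
      by_cases hc : c = '{'
      · subst hc
        simp only [a_braopen_loop, d_braopen, and_self, if_pos, if_true]
        norm_num
        rw [loop_one]
        by_cases hr : rest = []
        · subst hr
          have : cadena = "{" := hiff.mpr hl
          simp [this]
        · have : ¬ cadena = "{" := by
            intro h; rw [hiff] at h; rw [hl] at h
            simp at h; exact hr h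
          simp [hr, this]
      · have : ¬ cadena = "{" := by
          intro h; rw [hiff] at h; rw [hl] at h
          simp at h; exact hc h.1
        simp [a_braopen_loop, d_braopen, hc, loop_trampa, this]
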